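-- pv_equiv track=rewrite | github.com/ye0nj00/Kubernetes-Rescheduling | harzard_detect.py | detection
-- ===== SOURCE A (Python) =====
-- def detection(node_name, cluster_monitoring):
--
--     harzard_nodes = []
--     most_harzard = ''
--     threshold = 30 # 안전 임계치
--
--     for nodename in node_name:  # 각 노드의 cpu(%) 사용량 중 하나가 임계치를 넘으면 위험 노드로 설정
--         status = cluster_monitoring.get(nodename, {})
--
--         if (status['cpu_pct'] >= threshold):
--             harzard_nodes.append(nodename)
--
--
--     if harzard_nodes:
--         h_avr = {}
--
--         for nodename in harzard_nodes:
--             status = cluster_monitoring.get(nodename, {})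
--             pct = status['cpu_pct']
--             h_avr[nodename] = pct
--
--         most_harzard = max(h_avr, key = h_avr.get)  # 위험 노드 중 cpu(%)가 가장 높은 node를 재배치가 필요한 노드로 선정
--
--
--     return most_harzard, harzard_nodes
-- ===== SOURCE B (Python) =====
-- def detection(node_name, cluster_monitoring):
--     harzard_nodes = []
--     most_harzard = ''
--     best = None
--     threshold = 30
--     for nodename in node_name:
--         pct = cluster_monitoring.get(nodename, {})['cpu_pct']
--         if pct >= threshold:
--             harzard_nodes.append(nodename)
--             if best is None or pct > best:
--                 best = pct
--                 most_harzard = nodename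
--     return most_harzard, harzard_nodes
-- ===== Notes on version B (the rewrite author's own statement) =====
-- stated objective: alternative
-- what changed: Single pass that maintains the argmax inline (strict > keeps the first maximum), replacing A's second loop building an h_avr dict and the separate max(key=dict.get) pass.
import Mathlib
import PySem

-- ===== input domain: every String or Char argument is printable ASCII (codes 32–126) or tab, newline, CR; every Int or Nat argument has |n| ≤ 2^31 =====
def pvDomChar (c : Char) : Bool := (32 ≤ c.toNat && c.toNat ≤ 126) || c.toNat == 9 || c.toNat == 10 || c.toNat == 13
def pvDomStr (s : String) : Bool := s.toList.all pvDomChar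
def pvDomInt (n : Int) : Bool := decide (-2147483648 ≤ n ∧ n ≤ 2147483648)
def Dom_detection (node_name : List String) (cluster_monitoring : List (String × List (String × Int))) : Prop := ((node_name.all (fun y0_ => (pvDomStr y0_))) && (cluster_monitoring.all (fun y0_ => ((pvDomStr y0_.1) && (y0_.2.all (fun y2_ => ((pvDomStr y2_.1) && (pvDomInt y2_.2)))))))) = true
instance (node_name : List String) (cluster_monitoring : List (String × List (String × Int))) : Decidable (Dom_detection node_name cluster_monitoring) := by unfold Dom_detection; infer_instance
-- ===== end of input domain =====

-- B replaces A's second loop (h_avr dict + max(key=dict.get)) by an inline running argmax in a single pass; alternative decomposition, same asymptotic cost.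


-- ===== PORT A =====
-- cluster_monitoring.get(nodename, {}) : assoc-list lookup (first match), default empty dict
def pyDictGet (cm : List (String × List (String × Int))) (k : String) : List (String × Int) :=
  (List.lookup k cm).getD []

-- status['cpu_pct'] : KeyError when absent — those inputs are excluded by Pre_detection; total form uses default 0
def statusCpu (status : List (String × Int)) : Int :=
  (List.lookup "cpu_pct" status).getD 0

def detection (node_name : List String) (cluster_monitoring : List (String × List (String × Int))) : String × List String :=
  let threshold : Int := 30
  let harzard_nodes := node_name.foldl (fun acc nodename =>
      let status := pyDictGet cluster_monitoring nodename
      if threshold ≤ statusCpu status then acc ++ [nodename] else acc) []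
  let most_harzard : String := ""
  if harzard_nodes ≠ [] then
    let h_avr := harzard_nodes.foldl (fun d nodename =>
        let status := pyDictGet cluster_monitoring nodename
        let pct := statusCpu status
        d.insert nodename pct) (PySem.Dict.empty : PySem.Dict String Int)
    let most := (PySem.List.max? h_avr.keys (fun k => h_avr.getD k 0)).getD most_harzard
    (most, harzard_nodes)
  else
    (most_harzard, harzard_nodes)

-- ===== PORT B =====
-- cluster_monitoring.get(nodename, {})['cpu_pct'] in one step (same KeyError domain as A, excluded by Pre_detection)
def cpuPct (cm : List (String × List (String × Int))) (n : String) : Int :=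
  (List.lookup "cpu_pct" ((List.lookup n cm).getD [])).getD 0

-- the single loop of B, carrying (harzard_nodes, most_harzard, best)
def detGo (cm : List (String × List (String × Int))) :
    List String → List String → String → Option Int → String × List String
  | [], hn, most, _ => (most, hn)
  | n :: rest, hn, most, best =>
    let pct := cpuPct cm n
    if 30 ≤ pct then
      match best with
      | none => detGo cm rest (hn ++ [n]) n (some pct)
      | some b =>
        if b < pct then detGo cm rest (hn ++ [n]) n (some pct)
        else detGo cm rest (hn ++ [n]) most (some b)
    else detGo cm rest hn most best

def detection_alt (node_name : List String) (cluster_monitoring : List (String × List (String × Int))) : String × List String :=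
  detGo cluster_monitoring node_name [] "" none

-- ===== PRECONDITION & SPEC =====
-- Pre_ excludes exactly the inputs where Python A raises KeyError: some listed node whose (possibly missing) status dict has no 'cpu_pct' key.
def Pre_detection (node_name : List String) (cluster_monitoring : List (String × List (String × Int))) : Prop :=
  ∀ n ∈ node_name, (List.lookup "cpu_pct" ((List.lookup n cluster_monitoring).getD [])).isSome = true
instance (node_name : List String) (cluster_monitoring : List (String × List (String × Int))) : Decidable (Pre_detection node_name cluster_monitoring) := by unfold Pre_detection; infer_instance

def pvWitness_detection : List String × (List (String × List (String × Int))) :=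
  (["n1", "n2"], [("n1", [("cpu_pct", 50)]), ("n2", [("cpu_pct", 10)])])

def Spec_detection (node_name : List String) (cluster_monitoring : List (String × List (String × Int))) (out : String × List String) : Prop := out = detection_alt node_name cluster_monitoring
instance (node_name : List String) (cluster_monitoring : List (String × List (String × Int))) (out : String × List String) : Decidable (Spec_detection node_name cluster_monitoring out) := by unfold Spec_detection; infer_instance

-- ===== CLAIM (what is proved, stated in full; the proofs are below) =====
def Claim_equal_detection : Prop := ∀ (node_name : List String) (cluster_monitoring : List (String × List (String × Int))), Dom_detection node_name cluster_monitoring → Pre_detection node_name cluster_monitoring → Spec_detection node_name cluster_monitoring (detection node_name cluster_monitoring)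

-- ===== LEMMAS AND PROOFS =====

-- the folding step of PySem.List.max? with key
def mstep (key : String → Int) (acc : Option String) (x : String) : Option String :=
  match acc with
  | none => some x
  | some m => if key m < key x then some x else some m

theorem max?_eq_foldl_mstep (xs : List String) (key : String → Int) :
    PySem.List.max? xs key = xs.foldl (mstep key) none := by
  unfold PySem.List.max?
  congr 1
  funext acc x
  cases acc with
  | none => rfl
  | some m =>
    by_cases h : key m < key x
    · simp only [mstep, if_pos h]
    · simp only [mstep, if_neg h]

-- one step of the fold returns some maximum dominating both its arguments
theorem mstep_bound (key : String → Int) (acc : Option String) (x : String) :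
    ∃ m, mstep key acc x = some m ∧ key x ≤ key m ∧ ∀ a, acc = some a → key a ≤ key m := by
  cases acc with
  | none => exact ⟨x, rfl, le_refl _, by intro a h; cases h⟩
  | some a =>
    by_cases h : key a < key x
    · exact ⟨x, by simp [mstep, h], le_refl _, by intro b hb; injection hb with hb; subst hb; omega⟩
    · exact ⟨a, by simp [mstep, h], by omega, by intro b hb; injection hb with hb; subst hb; exact le_refl _⟩

-- duplicates dominated by the accumulator can be filtered out
theorem foldl_mstep_filter_ne (key : String → Int) (x : String) :
    ∀ (s : List String) (m : String), key x ≤ key m →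
      (s.filter (fun y => y ≠ x)).foldl (mstep key) (some m) = s.foldl (mstep key) (some m) := by
  intro s
  induction s with
  | nil => intro m _; rfl
  | cons y t ih =>
    intro m hxm
    by_cases hyx : y = x
    · subst hyx
      simp only [List.filter_cons, ne_eq, not_true_eq_false, decide_false,
        Bool.false_eq_true, if_false, List.foldl_cons]
      have : mstep key (some m) y = some m := by
        simp only [mstep]; rw [if_neg (by omega)]
      rw [this]; exact ih m hxm
    · simp only [List.filter_cons, ne_eq, hyx, not_false_eq_true, decide_true, if_true,
        List.foldl_cons]
      obtain ⟨m', hm', _, hold⟩ := mstep_bound key (some m) y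
      rw [hm']
      exact ih m' (le_trans hxm (hold m rfl))

-- Set.ofList (x :: l) = x :: (Set.ofList l minus x)
theorem ofList_cons_eq (x : String) (l : List String) :
    PySem.Set.ofList (x :: l) = x :: (PySem.Set.ofList l).filter (fun y => y ≠ x) := by
  have h1 : PySem.Set.ofList (x :: l) = PySem.Set.update (PySem.Set.add [] x) l := by
    rw [← PySem.Set.update_empty]; rfl
  have h2 : PySem.Set.add ([] : List String) x = [x] := rfl
  rw [h1, h2, PySem.Set.update_eq_append_filter]
  simp [PySem.Set.contains, eq_comm]

-- running max? over the deduplicated list equals running it over the list itself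
theorem foldl_mstep_ofList (key : String → Int) :
    ∀ (l : List String) (acc : Option String),
      (PySem.Set.ofList l).foldl (mstep key) acc = l.foldl (mstep key) acc := by
  intro l
  induction l with
  | nil => intro acc; rfl
  | cons x t ih =>
    intro acc
    rw [ofList_cons_eq, List.foldl_cons, List.foldl_cons]
    obtain ⟨m, hm, hxle, _⟩ := mstep_bound key acc x
    rw [hm, foldl_mstep_filter_ne key x (PySem.Set.ofList t) m hxle, ih]

-- congruence of the max? fold under a pointwise-equal key
theorem foldl_mstep_congr (f g : String → Int) :
    ∀ (xs : List String) (acc : Option String),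
      (∀ x ∈ xs, f x = g x) → (acc = none ∨ ∃ m, acc = some m ∧ f m = g m) →
      xs.foldl (mstep f) acc = xs.foldl (mstep g) acc := by
  intro xs
  induction xs with
  | nil => intro acc _ _; rfl
  | cons x t ih =>
    intro acc hmem hacc
    have hx : f x = g x := hmem x (List.mem_cons_self)
    have hstep : mstep f acc x = mstep g acc x ∧
        (mstep f acc x = none ∨ ∃ m, mstep f acc x = some m ∧ f m = g m) := by
      rcases hacc with h | ⟨m, hm, hfm⟩
      · subst h; exact ⟨rfl, Or.inr ⟨x, rfl, hx⟩⟩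
      · subst hm
        refine ⟨by simp only [mstep, hfm, hx], ?_⟩
        simp only [mstep]
        split
        · exact Or.inr ⟨x, rfl, hx⟩
        · exact Or.inr ⟨m, rfl, hfm⟩
    rw [List.foldl_cons, List.foldl_cons, ← hstep.1]
    exact ih _ (fun y hy => hmem y (List.mem_cons_of_mem _ hy)) hstep.2

-- value of the h_avr-style insert loop
theorem getD_foldl_insert_fun (f : String → Int) :
    ∀ (l : List String) (d : PySem.Dict String Int) (k : String) (d0 : Int),
      (l.foldl (fun d n => d.insert n (f n)) d).getD k d0 =
        if k ∈ l then f k else d.getD k d0 := by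
  intro l
  induction l with
  | nil => intro d k d0; simp
  | cons x t ih =>
    intro d k d0
    rw [List.foldl_cons, ih]
    by_cases hk : k ∈ t
    · simp [hk]
    · rw [if_neg hk, PySem.Dict.getD_insert]
      by_cases hx : k = x <;> simp [hx, hk]

-- B's loop computes (inline argmax of the hazard suffix, hazard list)
theorem detGo_spec (cm : List (String × List (String × Int))) :
    ∀ (l hn : List String) (o : Option String),
      detGo cm l hn (o.getD "") (o.map (cpuPct cm)) =
        (((l.filter (fun n => 30 ≤ cpuPct cm n)).foldl (mstep (cpuPct cm)) o).getD "",
          hn ++ l.filter (fun n => 30 ≤ cpuPct cm n)) := by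
  intro l
  induction l with
  | nil => intro hn o; simp [detGo]
  | cons n t ih =>
    intro hn o
    by_cases hp : 30 ≤ cpuPct cm n
    · cases o with
      | none =>
        simp only [Option.getD_none, Option.map_none, detGo, if_pos hp]
        have := ih (hn ++ [n]) (some n)
        simp only [Option.getD_some, Option.map_some] at this
        rw [this]
        simp [hp, mstep]
      | some m =>
        simp only [Option.getD_some, Option.map_some, detGo, if_pos hp]
        by_cases hlt : cpuPct cm m < cpuPct cm n
        · rw [if_pos hlt]
          have := ih (hn ++ [n]) (some n)
          simp only [Option.getD_some, Option.map_some] at this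
          rw [this]
          simp [hp, mstep, hlt]
        · rw [if_neg hlt]
          have := ih (hn ++ [n]) (some m)
          simp only [Option.getD_some, Option.map_some] at this
          rw [this]
          simp [hp, mstep, hlt]
    · simp only [detGo, if_neg hp]
      rw [ih hn o]
      simp [hp]

-- ===== VERDICT (by name: the statement is the Claim_ definition above) =====
theorem detection_spec : Claim_equal_detection := by
  intro node_name cm _ _
  unfold Spec_detection detection detection_alt
  have hpct : ∀ n, statusCpu (pyDictGet cm n) = cpuPct cm n := fun n => rfl
  have h1 : node_name.foldl (fun acc nodename =>
      if (30:Int) ≤ statusCpu (pyDictGet cm nodename) then acc ++ [nodename] else acc) [] =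
      node_name.filter (fun n => decide (30 ≤ cpuPct cm n)) := by
    have := PySem.List.foldl_append_if (fun n => decide ((30:Int) ≤ statusCpu (pyDictGet cm n)))
      (id : String → String) node_name []
    simp only [List.nil_append, List.map_id] at this
    simpa [hpct] using this
  have hB := detGo_spec cm node_name [] none
  simp only [Option.getD_none, Option.map_none, List.nil_append] at hB
  rw [hB]
  simp only [h1]
  by_cases hne : node_name.filter (fun n => decide (30 ≤ cpuPct cm n)) = []
  · rw [if_neg (by simpa using hne), hne]
    rfl
  · rw [if_pos (by simpa using hne)]
    refine Prod.ext ?_ rfl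
    show ((PySem.List.max?
        ((node_name.filter (fun n => decide (30 ≤ cpuPct cm n))).foldl (fun d nodename =>
          d.insert nodename (statusCpu (pyDictGet cm nodename)))
          (PySem.Dict.empty : PySem.Dict String Int)).keys
        (fun k => ((node_name.filter (fun n => decide (30 ≤ cpuPct cm n))).foldl (fun d nodename =>
          d.insert nodename (statusCpu (pyDictGet cm nodename)))
          (PySem.Dict.empty : PySem.Dict String Int)).getD k 0)).getD "")
      = ((node_name.filter (fun n => decide (30 ≤ cpuPct cm n))).foldl (mstep (cpuPct cm)) none).getD ""
    have hkeys : ((node_name.filter (fun n => decide (30 ≤ cpuPct cm n))).foldl (fun d nodename =>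
        d.insert nodename (statusCpu (pyDictGet cm nodename)))
        (PySem.Dict.empty : PySem.Dict String Int)).keys
        = PySem.Set.ofList (node_name.filter (fun n => decide (30 ≤ cpuPct cm n))) := by
      rw [PySem.Dict.keys_foldl_insert]
      exact PySem.Set.update_nil_left _
    have hget : ∀ k ∈ PySem.Set.ofList (node_name.filter (fun n => decide (30 ≤ cpuPct cm n))),
        ((node_name.filter (fun n => decide (30 ≤ cpuPct cm n))).foldl (fun d nodename =>
          d.insert nodename (statusCpu (pyDictGet cm nodename)))
          (PySem.Dict.empty : PySem.Dict String Int)).getD k 0 = cpuPct cm k := by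
      intro k hk
      rw [getD_foldl_insert_fun (fun n => statusCpu (pyDictGet cm n))
        (node_name.filter (fun n => decide (30 ≤ cpuPct cm n))) _ k 0]
      have hkmem : k ∈ node_name.filter (fun n => decide (30 ≤ cpuPct cm n)) :=
        (PySem.Set.mem_ofList _ _).mp hk
      simp [hkmem, hpct]
    rw [max?_eq_foldl_mstep, hkeys,
      foldl_mstep_congr _ (cpuPct cm) _ none (fun x hx => hget x hx) (Or.inl rfl),
      foldl_mstep_ofList]
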